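-- pv_equiv track=rewrite | github.com/Wasabee69/Norwegian_Olympiad_Coding | NCPC2025/ProblemG.py | solve
-- ===== SOURCE A (Python) =====
-- def solve(n, m, k, edges):
--
--
--     roots = list(range(n+1))
--     def root(node):
--         if roots[node] != node:
--             roots[node] = root(roots[node])
--         return roots[node]
--
--     for u, v, in edges:
--         ru, rv = root(u), root(v)
--         if ru != rv:
--             roots[rv] = ru
--
--
--     components = {}
--     for i in range(1, n+1):
--         ru = root(i)
--         if ru not in components:
--             components[ru] = []
--         components[ru].append(i)
--
--     res = [-1] * (n+1)
--     idx = {ru:0 for ru in components}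
--     for i in range(1, n+1):
--         ru = root(i)
--         res[i] = (idx[ru] % k) + 1
--         idx[ru] += 1
--     if any(idx[ru] < k for ru in components):
--         return "impossible"
--
--     return " ".join(map(str, res[1:]))
-- ===== SOURCE B (Python) =====
-- def solve(n, m, k, edges):
--     # Components by edge-fold relabelling: comp[i] is the class representative;
--     # merging an edge rewrites every occurrence of one representative.
--     comp = list(range(n + 1))
--     for u, v in edges:
--         cu, cv = comp[u], comp[v]
--         if cu != cv:
--             comp = [cu if c == cv else c for c in comp]
--     labels = []
--     seen = {}
--     for i in range(1, n + 1):
--         c = comp[i]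
--         t = seen.get(c, 0)
--         labels.append(str(t % k + 1))
--         seen[c] = t + 1
--     if any(t < k for t in seen.values()):
--         return "impossible"
--     return " ".join(labels)
-- ===== Notes on version B (the rewrite author's own statement) =====
-- stated objective: simpler
-- what changed: A's recursive path-compressing union-find with three passes over 1..n (components dict, pre-initialised index dict, preallocated res array) is replaced by a fold over the edges that merges components by rewriting one representative into the other across the comp array, followed by a single labelling pass with a get-default counter dict.
import Mathlib
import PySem

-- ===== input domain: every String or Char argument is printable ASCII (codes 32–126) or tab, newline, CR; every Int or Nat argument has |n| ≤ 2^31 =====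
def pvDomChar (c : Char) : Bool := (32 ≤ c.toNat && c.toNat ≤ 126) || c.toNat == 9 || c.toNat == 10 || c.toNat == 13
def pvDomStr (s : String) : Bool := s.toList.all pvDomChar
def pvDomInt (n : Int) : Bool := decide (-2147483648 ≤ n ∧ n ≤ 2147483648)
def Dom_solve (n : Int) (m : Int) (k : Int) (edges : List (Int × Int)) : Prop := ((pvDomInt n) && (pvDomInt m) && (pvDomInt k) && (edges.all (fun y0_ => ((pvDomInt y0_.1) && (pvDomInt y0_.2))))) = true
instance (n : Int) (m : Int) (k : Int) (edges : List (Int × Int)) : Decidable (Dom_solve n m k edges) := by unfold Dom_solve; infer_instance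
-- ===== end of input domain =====

-- B replaces A's recursive path-compressing union-find (three passes over 1..n with a
-- mutated parent array and a pre-initialised index dict) by a fold over the edges that
-- rewrites component representatives in place, plus one labelling pass with a
-- default-dict counter; objective: simpler (no recursion, no mutable parent state).

-- ===== PORT A =====
-- `root(node)` with path compression; fuel (edges.length + 1) is a totality guard only:
-- inside Pre_ every find terminates within it (chains grow by one per union).
def rootA : Nat → List Int → Int → List Int × Int
  | 0, roots, node => (roots, node)
  | fuel+1, roots, node =>
    let p := PySem.List.pyGetD roots node 0          -- roots[node] (in range under Pre_)
    if p ≠ node then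
      let r := rootA fuel roots p
      (PySem.List.pySetD r.1 node r.2, r.2)          -- roots[node] = root(roots[node])
    else (roots, node)

-- one iteration of `for u, v in edges: ...`
def unionA (fuel : Nat) (roots : List Int) (uv : Int × Int) : List Int :=
  let r1 := rootA fuel roots uv.1
  let r2 := rootA fuel r1.1 uv.2
  if r1.2 ≠ r2.2 then PySem.List.pySetD r2.1 r2.2 r1.2 else r2.1

-- one iteration of the `components` loop (state: roots, components)
def compsStepA (fuel : Nat) (st : List Int × PySem.Dict Int (List Int)) (i : Int) :
    List Int × PySem.Dict Int (List Int) :=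
  let r := rootA fuel st.1 i
  let comps := if st.2.contains r.2 then st.2 else st.2.insert r.2 []
  (r.1, comps.modify r.2 [] (fun l => l ++ [i]))     -- components[ru].append(i); key present

-- idx = {ru: 0 for ru in components}
def idxInitA (comps : PySem.Dict Int (List Int)) : PySem.Dict Int Int :=
  comps.keys.foldl (fun d ru => d.insert ru 0) PySem.Dict.empty

-- one iteration of the `res` loop (state: roots, idx, res); idx[ru] is a present key
-- under Pre_, ported as getD 0
def resStepA (fuel : Nat) (k : Int) (st : List Int × PySem.Dict Int Int × List Int) (i : Int) :
    List Int × PySem.Dict Int Int × List Int :=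
  let r := rootA fuel st.1 i
  let t := st.2.1.getD r.2 0
  (r.1, st.2.1.insert r.2 (t + 1), PySem.List.pySetD st.2.2 i (PySem.Int.mod t k + 1))

def solve (n : Int) (m : Int) (k : Int) (edges : List (Int × Int)) : String :=
  let fuel := edges.length + 1
  let roots := edges.foldl (unionA fuel) (PySem.List.pyRange 0 (n+1) 1)
  let st2 := (PySem.List.pyRange 1 (n+1) 1).foldl (compsStepA fuel) (roots, PySem.Dict.empty)
  let st3 := (PySem.List.pyRange 1 (n+1) 1).foldl (resStepA fuel k)
      (st2.1, idxInitA st2.2, List.replicate (n+1).toNat (-1))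
  if st2.2.keys.any (fun ru => st3.2.1.getD ru 0 < k) then "impossible"
  else PySem.Str.join " " ((PySem.List.slice st3.2.2 (some 1) none).map PySem.Int.toStr)

-- ===== PORT B =====
-- merge the classes of an edge by rewriting every occurrence of one representative
def relabelB (comp : List Int) (uv : Int × Int) : List Int :=
  let cu := PySem.List.pyGetD comp uv.1 0
  let cv := PySem.List.pyGetD comp uv.2 0
  if cu ≠ cv then comp.map (fun c => if c = cv then cu else c) else comp

-- one iteration of the labelling pass (state: labels, seen)
def labelStepB (comp : List Int) (k : Int) (st : List String × PySem.Dict Int Int) (i : Int) :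
    List String × PySem.Dict Int Int :=
  let c := PySem.List.pyGetD comp i 0
  let t := st.2.getD c 0
  (st.1 ++ [PySem.Int.toStr (PySem.Int.mod t k + 1)], st.2.insert c (t + 1))

def solve_alt (n : Int) (m : Int) (k : Int) (edges : List (Int × Int)) : String :=
  let comp := edges.foldl relabelB (PySem.List.pyRange 0 (n+1) 1)
  let st := (PySem.List.pyRange 1 (n+1) 1).foldl (labelStepB comp k) ([], PySem.Dict.empty)
  if st.2.values.any (fun t => t < k) then "impossible"
  else PySem.Str.join " " st.1

-- ===== PRECONDITION & SPEC =====
-- Pre_ excludes exactly the inputs on which A raises: k = 0 with n ≥ 1 (ZeroDivisionError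
-- in `idx[ru] % k`), an edge endpoint outside [-(n+1), n] (IndexError on `roots[node]`),
-- and edges together with n < 0 (IndexError, the roots list is too short). Negative
-- endpoints down to -(n+1) (Python's index wraparound) and n < 0 with no edges are inside.
def Pre_solve (n : Int) (m : Int) (k : Int) (edges : List (Int × Int)) : Prop :=
  (0 ≤ n ∧ (n = 0 ∨ k ≠ 0) ∧ ∀ e ∈ edges, -(n+1) ≤ e.1 ∧ e.1 ≤ n ∧ -(n+1) ≤ e.2 ∧ e.2 ≤ n)
  ∨ (n < 0 ∧ edges = [])
instance (n : Int) (m : Int) (k : Int) (edges : List (Int × Int)) : Decidable (Pre_solve n m k edges) := by unfold Pre_solve; infer_instance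
def pvWitness_solve : Int × Int × Int × (List (Int × Int)) := (3, 2, 2, [(1, 2), (2, 3)])

def Spec_solve (n : Int) (m : Int) (k : Int) (edges : List (Int × Int)) (out : String) : Prop := out = solve_alt n m k edges
instance (n : Int) (m : Int) (k : Int) (edges : List (Int × Int)) (out : String) : Decidable (Spec_solve n m k edges out) := by unfold Spec_solve; infer_instance

-- ===== CLAIM (what is proved, stated in full; the proofs are below) =====
def Claim_equal_solve : Prop := ∀ (n : Int) (m : Int) (k : Int) (edges : List (Int × Int)), Dom_solve n m k edges → Pre_solve n m k edges → Spec_solve n m k edges (solve n m k edges)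

-- ===== LEMMAS AND PROOFS =====
-- proof-side shorthands
def PPar (roots : List Int) (i : Int) : Int := PySem.List.pyGetD roots i 0

def iterP (roots : List Int) : Nat → Int → Int
  | 0, i => i
  | d+1, i => iterP roots d (PPar roots i)

def InRng (N i : Int) : Prop := 0 ≤ i ∧ i ≤ N

def RootsOk (N : Int) (roots : List Int) : Prop :=
  roots.length = (N+1).toNat ∧ ∀ i, InRng N i → InRng N (PPar roots i)

def Reach (roots : List Int) (b : Nat) (i r : Int) : Prop :=
  ∃ d, d ≤ b ∧ iterP roots d i = r ∧ PPar roots r = r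

def CC (comp : List Int) (i : Int) : Int := PySem.List.pyGetD comp i 0

def InvAB (N : Int) (b : Nat) (roots comp : List Int) : Prop :=
  RootsOk N roots ∧ comp.length = (N+1).toNat ∧
  ∀ i, InRng N i → InRng N (CC comp i) ∧ CC comp (CC comp i) = CC comp i ∧ Reach roots b i (CC comp i)

theorem PPar_pySetD (N x i : Int) (roots : List Int) (hlen : roots.length = (N+1).toNat)
    (hx : InRng N x) (hi : InRng N i) (v : Int) :
    PPar (PySem.List.pySetD roots x v) i = if i = x then v else PPar roots i := by
  obtain ⟨hx0, hxN⟩ := hx; obtain ⟨hi0, hiN⟩ := hi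
  have hxl : x.toNat < roots.length := by omega
  have hil : i.toNat < roots.length := by omega
  unfold PPar
  rw [PySem.List.pySetD_of_nonneg roots v hx0]
  rw [PySem.List.pyGetD_eq_getElem _ _ hi0 (by rw [List.length_set]; omega),
      PySem.List.pyGetD_eq_getElem _ _ hi0 (by omega)]
  rw [List.getElem_set]
  by_cases h : i = x
  · simp [h]
  · have hne : ¬ (x.toNat = i.toNat) := by omega
    simp [hne, h]

theorem length_pySetD' (roots : List Int) (x v : Int) :
    (PySem.List.pySetD roots x v).length = roots.length := by
  simp [PySem.List.length_pySetD]

theorem iterP_fix (roots : List Int) (r : Int) (h : PPar roots r = r) :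
    ∀ d, iterP roots d r = r := by
  intro d; induction d with
  | zero => rfl
  | succ d ih => simp [iterP, h, ih]

theorem iterP_add (roots : List Int) (a b : Nat) (i : Int) :
    iterP roots (a + b) i = iterP roots b (iterP roots a i) := by
  induction a generalizing i with
  | zero => simp [iterP]
  | succ a ih =>
    have : a + 1 + b = (a + b) + 1 := by omega
    rw [this]
    simp only [iterP]
    rw [ih]

theorem reach_det (roots : List Int) (b1 b2 : Nat) (i r1 r2 : Int)
    (h1 : Reach roots b1 i r1) (h2 : Reach roots b2 i r2) : r1 = r2 := by
  obtain ⟨d1, _, he1, hr1⟩ := h1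
  obtain ⟨d2, _, he2, hr2⟩ := h2
  rcases le_total d1 d2 with h | h
  · have : iterP roots (d1 + (d2 - d1)) i = r2 := by rw [Nat.add_sub_cancel' h]; exact he2
    rw [iterP_add, he1, iterP_fix roots r1 hr1] at this
    exact this
  · have : iterP roots (d2 + (d1 - d2)) i = r1 := by rw [Nat.add_sub_cancel' h]; exact he1
    rw [iterP_add, he2, iterP_fix roots r2 hr2] at this
    exact this.symm

theorem iterP_inRng (N : Int) (roots : List Int) (h : RootsOk N roots) (i : Int) (hi : InRng N i)
    (d : Nat) : InRng N (iterP roots d i) := by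
  induction d generalizing i with
  | zero => exact hi
  | succ d ih => exact ih _ (h.2 i hi)

theorem rootsOk_pySetD (N : Int) (roots : List Int) (x r : Int) (hok : RootsOk N roots)
    (hx : InRng N x) (hr : InRng N r) : RootsOk N (PySem.List.pySetD roots x r) := by
  refine ⟨by rw [length_pySetD']; exact hok.1, ?_⟩
  intro i hi
  rw [PPar_pySetD N x i roots hok.1 hx hi r]
  split
  · exact hr
  · exact hok.2 i hi

theorem reach_compress (N : Int) (roots : List Int) (x r : Int) (bx : Nat)
    (hok : RootsOk N roots) (hx : InRng N x) (hxr : Reach roots bx x r) :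
    ∀ b i r', InRng N i → Reach roots b i r' → Reach (PySem.List.pySetD roots x r) b i r' := by
  intro b i r' hi hre
  obtain ⟨d, hd, hit, hroot⟩ := hre
  have hr' : InRng N r' := by rw [← hit]; exact iterP_inRng N roots hok i hi d
  -- the new root condition
  have hroot' : PPar (PySem.List.pySetD roots x r) r' = r' := by
    rw [PPar_pySetD N x r' roots hok.1 hx hr' r]
    split
    · rename_i hxx
      subst hxx
      have : r = r' := reach_det roots bx 0 r' r r' hxr ⟨0, le_refl 0, rfl, hroot⟩
      omega
    · exact hroot
  -- new chain, by induction on d (bound d' ≤ d)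
  have key : ∀ (e : Nat) (i : Int), InRng N i → iterP roots e i = r' →
      ∃ d', d' ≤ e ∧ iterP (PySem.List.pySetD roots x r) d' i = r' := by
    intro e
    induction e with
    | zero => exact fun i _ hit => ⟨0, le_refl 0, hit⟩
    | succ e ih =>
      intro i hi hit
      by_cases hix : i = x
      · subst hix
        have hrr' : r = r' :=
          reach_det roots bx (e+1) i r r' hxr ⟨e+1, le_refl _, hit, hroot⟩
        by_cases hri : r = i
        · refine ⟨0, Nat.zero_le _, ?_⟩
          show i = r'
          omega
        · refine ⟨1, by omega, ?_⟩
          show iterP (PySem.List.pySetD roots i r) 0 (PPar (PySem.List.pySetD roots i r) i) = r'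
          rw [PPar_pySetD N i i roots hok.1 hx hx r, if_pos rfl]
          simpa [iterP] using hrr'
      · have hstep : PPar (PySem.List.pySetD roots x r) i = PPar roots i := by
          rw [PPar_pySetD N x i roots hok.1 hx hi r, if_neg hix]
        obtain ⟨d', hd', hit'⟩ := ih (PPar roots i) (hok.2 i hi) hit
        refine ⟨d' + 1, by omega, ?_⟩
        show iterP (PySem.List.pySetD roots x r) d' (PPar (PySem.List.pySetD roots x r) i) = r'
        rw [hstep]
        exact hit'
  obtain ⟨d', hd', hit'⟩ := key d i hi hit
  exact ⟨d', le_trans hd' hd, hit', hroot'⟩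

theorem rootA_spec (N : Int) : ∀ (fuel : Nat) (roots : List Int) (b : Nat) (i r : Int),
    RootsOk N roots → InRng N i → Reach roots b i r → b < fuel →
    ∃ roots', rootA fuel roots i = (roots', r) ∧ RootsOk N roots' ∧
      (∀ b' j r', InRng N j → Reach roots b' j r' → Reach roots' b' j r') := by
  intro fuel
  induction fuel with
  | zero => intro _ b _ _ _ _ _ h; omega
  | succ fuel ih =>
    intro roots b i r hok hi hre hb
    by_cases hp : PPar roots i = i
    · -- roots[node] == node: return (roots, node)
      have : r = i := reach_det roots b 0 i r i hre ⟨0, Nat.zero_le _, rfl, hp⟩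
      subst this
      refine ⟨roots, ?_, hok, fun b' j r' _ h => h⟩
      simp only [rootA]
      rw [if_neg (by simpa [PPar] using hp)]
    · -- recursive case
      obtain ⟨d, hd, hit, hroot⟩ := hre
      have hd1 : 1 ≤ d := by
        rcases Nat.eq_zero_or_pos d with h0 | h
        · exfalso; apply hp; rw [show i = r by simpa [h0, iterP] using hit]; exact hroot
        · exact h
      have hb1 : 1 ≤ b := le_trans hd1 hd
      have hrep : Reach roots (b-1) (PPar roots i) r := by
        refine ⟨d - 1, by omega, ?_, hroot⟩
        have : iterP roots (1 + (d-1)) i = r := by rw [show 1 + (d-1) = d by omega]; exact hit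
        rw [iterP_add] at this
        simpa [iterP] using this
      have hpi : InRng N (PPar roots i) := hok.2 i hi
      obtain ⟨roots1, heq1, hok1, hpres1⟩ := ih roots (b-1) (PPar roots i) r hok hpi hrep (by omega)
      have hreach1 : Reach roots1 b i r := hpres1 b i r hi ⟨d, hd, hit, hroot⟩
      have hr : InRng N r := by rw [← hit]; exact iterP_inRng N roots hok i hi d
      refine ⟨PySem.List.pySetD roots1 i r, ?_, rootsOk_pySetD N roots1 i r hok1 hi hr, ?_⟩
      · simp only [rootA]
        rw [if_pos (by simpa [PPar] using hp)]
        simp only [PPar] at heq1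
        rw [heq1]
      · intro b' j r' hj h
        exact reach_compress N roots1 i r b hok1 hi hreach1 b' j r' hj (hpres1 b' j r' hj h)

theorem reach_mono (roots : List Int) (b b' : Nat) (i r : Int) (h : b ≤ b')
    (hre : Reach roots b i r) : Reach roots b' i r := by
  obtain ⟨d, hd, hit, hroot⟩ := hre
  exact ⟨d, le_trans hd h, hit, hroot⟩

theorem CC_map (N i : Int) (comp : List Int) (f : Int → Int)
    (hlen : comp.length = (N+1).toNat) (hi : InRng N i) :
    CC (comp.map f) i = f (CC comp i) := by
  obtain ⟨hi0, hiN⟩ := hi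
  unfold CC
  rw [PySem.List.pyGetD_eq_getElem _ _ hi0 (by rw [List.length_map]; omega),
      PySem.List.pyGetD_eq_getElem _ _ hi0 (by omega)]
  simp

theorem reach_set_other (N : Int) (roots : List Int) (x w : Int) (hok : RootsOk N roots)
    (hx : InRng N x) (hxroot : PPar roots x = x) :
    ∀ b i r, r ≠ x → InRng N i → Reach roots b i r → Reach (PySem.List.pySetD roots x w) b i r := by
  intro b i r hrx hi hre
  obtain ⟨d, hd, hit, hroot⟩ := hre
  have hroot' : PPar (PySem.List.pySetD roots x w) r = r := by
    have hr : InRng N r := by rw [← hit]; exact iterP_inRng N roots hok i hi d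
    rw [PPar_pySetD N x r roots hok.1 hx hr w, if_neg hrx]
    exact hroot
  have key : ∀ (e : Nat) (i : Int), InRng N i → iterP roots e i = r →
      iterP (PySem.List.pySetD roots x w) e i = r := by
    intro e
    induction e with
    | zero => exact fun i _ hit => hit
    | succ e ih =>
      intro i hi hit
      have hix : i ≠ x := by
        intro hixx
        subst hixx
        rw [iterP_fix roots i hxroot] at hit
        exact hrx hit.symm
      have hstep : PPar (PySem.List.pySetD roots x w) i = PPar roots i := by
        rw [PPar_pySetD N x i roots hok.1 hx hi w, if_neg hix]
      show iterP (PySem.List.pySetD roots x w) e (PPar (PySem.List.pySetD roots x w) i) = r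
      rw [hstep]
      exact ih (PPar roots i) (hok.2 i hi) hit
  exact ⟨d, hd, key d i hi hit, hroot'⟩

theorem reach_minimal (roots : List Int) (b : Nat) (i r : Int) (h : Reach roots b i r) :
    ∃ d, d ≤ b ∧ iterP roots d i = r ∧ ∀ e, e < d → iterP roots e i ≠ r := by
  obtain ⟨d, hd, hit, hroot⟩ := h
  have hex : ∃ d, iterP roots d i = r := ⟨d, hit⟩
  refine ⟨Nat.find hex, le_trans (Nat.find_le hit) hd, Nat.find_spec hex, ?_⟩
  intro e he
  exact Nat.find_min hex he

theorem iter_set_hit (N : Int) (roots : List Int) (x w : Int) (hok : RootsOk N roots)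
    (hx : InRng N x) :
    ∀ (d : Nat) (i : Int), InRng N i → iterP roots d i = x → (∀ e, e < d → iterP roots e i ≠ x) →
    iterP (PySem.List.pySetD roots x w) d i = x := by
  intro d
  induction d with
  | zero => exact fun i _ hit _ => hit
  | succ d ih =>
    intro i hi hit hmin
    have hix : i ≠ x := by
      have := hmin 0 (by omega)
      simpa [iterP] using this
    have hstep : PPar (PySem.List.pySetD roots x w) i = PPar roots i := by
      rw [PPar_pySetD N x i roots hok.1 hx hi w, if_neg hix]
    show iterP (PySem.List.pySetD roots x w) d (PPar (PySem.List.pySetD roots x w) i) = x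
    rw [hstep]
    refine ih (PPar roots i) (hok.2 i hi) hit ?_
    intro e he
    have := hmin (e+1) (by omega)
    simpa [iterP] using this

theorem invAB_mono (N : Int) (b b' : Nat) (roots comp : List Int) (h : b ≤ b')
    (hinv : InvAB N b roots comp) : InvAB N b' roots comp := by
  obtain ⟨hok, hlen, hmain⟩ := hinv
  refine ⟨hok, hlen, fun i hi => ?_⟩
  obtain ⟨h1, h2, h3⟩ := hmain i hi
  exact ⟨h1, h2, reach_mono _ _ _ _ _ h h3⟩

theorem union_preserves (N : Int) (fuel b : Nat) (roots comp : List Int) (uv : Int × Int)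
    (hinv : InvAB N b roots comp) (hu : InRng N uv.1) (hv : InRng N uv.2) (hb : b < fuel) :
    InvAB N (b+1) (unionA fuel roots uv) (relabelB comp uv) := by
  obtain ⟨hok, hlen, hmain⟩ := hinv
  obtain ⟨hcu_rng, hcu_idem, hcu_reach⟩ := hmain uv.1 hu
  obtain ⟨hcv_rng, hcv_idem, hcv_reach⟩ := hmain uv.2 hv
  set cu := CC comp uv.1 with hcu_def
  set cv := CC comp uv.2 with hcv_def
  obtain ⟨roots1, heq1, hok1, hpres1⟩ := rootA_spec N fuel roots b uv.1 cu hok hu hcu_reach hb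
  have hcv_reach1 : Reach roots1 b uv.2 cv := hpres1 b uv.2 cv hv hcv_reach
  obtain ⟨roots2, heq2, hok2, hpres2⟩ := rootA_spec N fuel roots1 b uv.2 cv hok1 hv hcv_reach1 hb
  have hmain2 : ∀ i, InRng N i → InRng N (CC comp i) ∧ CC comp (CC comp i) = CC comp i ∧
      Reach roots2 b i (CC comp i) := by
    intro i hi
    obtain ⟨h1, h2, h3⟩ := hmain i hi
    exact ⟨h1, h2, hpres2 b i _ hi (hpres1 b i _ hi h3)⟩
  have hunfold : unionA fuel roots uv =
      if cu ≠ cv then PySem.List.pySetD roots2 cv cu else roots2 := by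
    unfold unionA
    simp only [heq1, heq2]
  have hrel : relabelB comp uv =
      if cu ≠ cv then comp.map (fun c => if c = cv then cu else c) else comp := by
    unfold relabelB
    rfl
  by_cases hne : cu = cv
  · rw [hunfold, hrel, if_neg (by simp [hne]), if_neg (by simp [hne])]
    exact invAB_mono N b (b+1) roots2 comp (by omega) ⟨hok2, hlen, hmain2⟩
  · rw [hunfold, hrel, if_pos hne, if_pos hne]
    have hcuroot : PPar roots2 cu = cu := by
      obtain ⟨-, -, d, -, -, hroot⟩ := hmain2 uv.1 hu
      exact hroot
    have hcvroot : PPar roots2 cv = cv := by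
      obtain ⟨-, -, d, -, -, hroot⟩ := hmain2 uv.2 hv
      exact hroot
    refine ⟨rootsOk_pySetD N roots2 cv cu hok2 hcv_rng hcu_rng, by rw [List.length_map]; exact hlen, ?_⟩
    intro i hi
    have hCC : CC (comp.map (fun c => if c = cv then cu else c)) i =
        if CC comp i = cv then cu else CC comp i := CC_map N i comp _ hlen hi
    obtain ⟨hc_rng, hc_idem, hc_reach⟩ := hmain2 i hi
    by_cases hicv : CC comp i = cv
    · rw [hCC, if_pos hicv]
      refine ⟨hcu_rng, ?_, ?_⟩
      · rw [CC_map N cu comp _ hlen hcu_rng, hcu_idem]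
        simp [hne]
      · -- chain: minimal chain to cv survives the write at cv, then one more step to cu
        obtain ⟨d, hd, hit, hmin⟩ := reach_minimal roots2 b i cv (hicv ▸ hc_reach)
        have hchain := iter_set_hit N roots2 cv cu hok2 hcv_rng d i hi hit hmin
        refine ⟨d + 1, by omega, ?_, ?_⟩
        · rw [iterP_add (PySem.List.pySetD roots2 cv cu) d 1 i, hchain]
          show PPar (PySem.List.pySetD roots2 cv cu) cv = cu
          rw [PPar_pySetD N cv cv roots2 hok2.1 hcv_rng hcv_rng cu, if_pos rfl]
        · rw [PPar_pySetD N cv cu roots2 hok2.1 hcv_rng hcu_rng cu, if_neg hne]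
          exact hcuroot
    · rw [hCC, if_neg hicv]
      refine ⟨hc_rng, ?_, ?_⟩
      · rw [CC_map N _ comp _ hlen hc_rng, hc_idem, if_neg hicv]
      · exact reach_mono _ b (b+1) _ _ (by omega)
          (reach_set_other N roots2 cv cu hok2 hcv_rng hcvroot b i (CC comp i) hicv hi hc_reach)

-- ===== phase 2: eliminating the union-find state from A's labelling loops =====

theorem rootA_inv (N : Int) (fuel b : Nat) (roots compF : List Int) (i : Int)
    (hinv : InvAB N b roots compF) (hi : InRng N i) (hb : b < fuel) :
    ∃ roots', rootA fuel roots i = (roots', CC compF i) ∧ InvAB N b roots' compF := by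
  obtain ⟨hok, hlen, hmain⟩ := hinv
  obtain ⟨h1, h2, h3⟩ := hmain i hi
  obtain ⟨roots', heq, hok', hpres⟩ := rootA_spec N fuel roots b i (CC compF i) hok hi h3 hb
  refine ⟨roots', heq, hok', hlen, fun j hj => ?_⟩
  obtain ⟨g1, g2, g3⟩ := hmain j hj
  exact ⟨g1, g2, hpres b j _ hj g3⟩

-- pure version of A's components loop (key: the final representative of i)
def compsPureStep (c : Int → Int) (d : PySem.Dict Int (List Int)) (i : Int) :
    PySem.Dict Int (List Int) :=
  (if d.contains (c i) then d else d.insert (c i) []).modify (c i) [] (fun ls => ls ++ [i])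

theorem comps_fold (N : Int) (fuel b : Nat) (compF : List Int) :
    ∀ (l : List Int) (roots : List Int) (d : PySem.Dict Int (List Int)),
    InvAB N b roots compF → (∀ i ∈ l, InRng N i) → b < fuel →
    (l.foldl (compsStepA fuel) (roots, d)).2 =
        l.foldl (compsPureStep (fun i => CC compF i)) d ∧
    InvAB N b (l.foldl (compsStepA fuel) (roots, d)).1 compF := by
  intro l
  induction l with
  | nil => exact fun roots d hinv _ _ => ⟨rfl, hinv⟩
  | cons i l ih =>
    intro roots d hinv hl hb
    obtain ⟨roots', heq, hinv'⟩ := rootA_inv N fuel b roots compF i hinv (hl i (by simp)) hb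
    have hstep : compsStepA fuel (roots, d) i = (roots', compsPureStep (fun i => CC compF i) d i) := by
      unfold compsStepA compsPureStep
      simp only [heq]
    simp only [List.foldl_cons, hstep]
    exact ih roots' _ hinv' (fun j hj => hl j (by simp [hj])) hb

-- pure version of A's res loop
def resPureStep (c : Int → Int) (k : Int) (st : PySem.Dict Int Int × List Int) (i : Int) :
    PySem.Dict Int Int × List Int :=
  (st.1.insert (c i) (st.1.getD (c i) 0 + 1),
   PySem.List.pySetD st.2 i (PySem.Int.mod (st.1.getD (c i) 0) k + 1))

theorem res_fold (N : Int) (fuel b : Nat) (k : Int) (compF : List Int) :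
    ∀ (l : List Int) (roots : List Int) (idx : PySem.Dict Int Int) (res : List Int),
    InvAB N b roots compF → (∀ i ∈ l, InRng N i) → b < fuel →
    (l.foldl (resStepA fuel k) (roots, idx, res)).2 =
        l.foldl (resPureStep (fun i => CC compF i) k) (idx, res) := by
  intro l
  induction l with
  | nil => exact fun roots idx res _ _ _ => rfl
  | cons i l ih =>
    intro roots idx res hinv hl hb
    obtain ⟨roots', heq, hinv'⟩ := rootA_inv N fuel b roots compF i hinv (hl i (by simp)) hb
    have hstep : resStepA fuel k (roots, idx, res) i =
        (roots', resPureStep (fun i => CC compF i) k (idx, res) i) := by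
      unfold resStepA resPureStep
      simp only [heq]
    simp only [List.foldl_cons, hstep]
    exact ih roots' _ _ hinv' (fun j hj => hl j (by simp [hj])) hb

-- ===== phase 3: pure comparison of the two labelling computations =====

-- the sequence of written label values (shared by both programs)
def valsP (c : Int → Int) (k : Int) : List Int → PySem.Dict Int Int → List Int
  | [], _ => []
  | i :: l, d =>
    (PySem.Int.mod (d.getD (c i) 0) k + 1) :: valsP c k l (d.insert (c i) (d.getD (c i) 0 + 1))

def dFold (c : Int → Int) (l : List Int) (d : PySem.Dict Int Int) : PySem.Dict Int Int :=
  l.foldl (fun d i => d.insert (c i) (d.getD (c i) 0 + 1)) d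

theorem length_valsP (c : Int → Int) (k : Int) :
    ∀ (l : List Int) (d : PySem.Dict Int Int), (valsP c k l d).length = l.length := by
  intro l
  induction l with
  | nil => intro d; rfl
  | cons i l ih => intro d; simp [valsP, ih]

theorem dFold_congr (c : Int → Int) :
    ∀ (l : List Int) (d1 d2 : PySem.Dict Int Int), (∀ x, d1.getD x 0 = d2.getD x 0) →
    ∀ x, (dFold c l d1).getD x 0 = (dFold c l d2).getD x 0 := by
  intro l
  induction l with
  | nil => exact fun d1 d2 h => h
  | cons i l ih =>
    intro d1 d2 h
    simp only [dFold, List.foldl_cons]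
    refine ih _ _ (fun x => ?_)
    rw [PySem.Dict.getD_insert, PySem.Dict.getD_insert]
    split
    · exact congrArg (· + 1) (h (c i))
    · exact h x

-- B's labelling loop produces exactly the valsP labels and the dFold counter dict
theorem labelB_fold (compF : List Int) (k : Int) :
    ∀ (l : List Int) (labels : List String) (seen : PySem.Dict Int Int),
    l.foldl (labelStepB compF k) (labels, seen) =
      (labels ++ (valsP (fun i => CC compF i) k l seen).map PySem.Int.toStr,
       dFold (fun i => CC compF i) l seen) := by
  intro l
  induction l with
  | nil => intro labels seen; simp [valsP, dFold]
  | cons i l ih =>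
    intro labels seen
    simp only [List.foldl_cons, valsP, dFold]
    rw [show labelStepB compF k (labels, seen) i =
        (labels ++ [PySem.Int.toStr (PySem.Int.mod (seen.getD (CC compF i) 0) k + 1)],
         seen.insert (CC compF i) (seen.getD (CC compF i) 0 + 1)) from rfl]
    rw [ih]
    simp [dFold]

-- A's pure res loop: the index dict evolves as dFold and the writes are the valsP values
theorem resPure_fold (c : Int → Int) (k : Int) :
    ∀ (l : List Int) (idx seen : PySem.Dict Int Int) (res : List Int),
    (∀ x, idx.getD x 0 = seen.getD x 0) →
    l.foldl (resPureStep c k) (idx, res) =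
      (dFold c l idx,
       (l.zip (valsP c k l seen)).foldl (fun r p => PySem.List.pySetD r p.1 p.2) res) := by
  intro l
  induction l with
  | nil => intro idx seen res h; simp [dFold, valsP]
  | cons i l ih =>
    intro idx seen res h
    simp only [List.foldl_cons, valsP, List.zip_cons_cons, dFold]
    rw [show resPureStep c k (idx, res) i =
        (idx.insert (c i) (idx.getD (c i) 0 + 1),
         PySem.List.pySetD res i (PySem.Int.mod (idx.getD (c i) 0) k + 1)) from rfl]
    rw [ih (idx.insert (c i) (idx.getD (c i) 0 + 1)) (seen.insert (c i) (seen.getD (c i) 0 + 1)) _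
        (fun x => by
          rw [PySem.Dict.getD_insert, PySem.Dict.getD_insert, h (c i)]
          split <;> [rfl; exact h x])]
    rw [h (c i)]
    rfl

-- ===== phase 4: positional writes, keys, and the final assembly =====

theorem take_set_succ (l : List Int) (n : Nat) (v : Int) (h : n < l.length) :
    (l.set n v).take (n+1) = l.take n ++ [v] := by
  rw [List.take_add_one, List.take_set, List.getElem?_set_self h,
      List.set_eq_of_length_le (by rw [List.length_take]; omega)]
  rfl

theorem write_run (N : Int) : ∀ (vals : List Int) (j : Int) (res : List Int),
    0 ≤ j → vals.length = ((N+1) - j).toNat → res.length = (N+1).toNat →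
    ((PySem.List.pyRange j (N+1) 1).zip vals).foldl
        (fun r (p : Int × Int) => PySem.List.pySetD r p.1 p.2) res
      = res.take j.toNat ++ vals := by
  intro vals
  induction vals with
  | nil =>
    intro j res hj hlen hres
    rw [List.zip_nil_right]
    simp only [List.foldl_nil, List.append_nil]
    simp only [List.length_nil] at hlen
    rw [List.take_of_length_le (by omega)]
  | cons v vs ih =>
    intro j res hj hlen hres
    have hjN : j < N + 1 := by
      simp only [List.length_cons] at hlen
      omega
    rw [PySem.List.pyRange_one_cons hjN, List.zip_cons_cons, List.foldl_cons]
    have hset : PySem.List.pySetD res j v = res.set j.toNat v :=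
      PySem.List.pySetD_of_nonneg res v hj
    rw [hset, ih (j+1) (res.set j.toNat v) (by omega)
        (by simp only [List.length_cons] at hlen ⊢; omega)
        (by rw [List.length_set]; exact hres)]
    have h1 : (j+1).toNat = j.toNat + 1 := by omega
    rw [h1, take_set_succ res j.toNat v (by omega)]
    simp

theorem idxInit_getD : ∀ (l : List Int) (d : PySem.Dict Int Int), (∀ x, d.getD x 0 = 0) →
    ∀ x, (l.foldl (fun d ru => d.insert ru 0) d).getD x 0 = 0 := by
  intro l
  induction l with
  | nil => exact fun d h => h
  | cons i l ih =>
    intro d h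
    simp only [List.foldl_cons]
    refine ih _ (fun x => ?_)
    rw [PySem.Dict.getD_insert]
    split <;> [rfl; exact h x]

theorem comps_keys (c : Int → Int) : ∀ (l : List Int) (d : PySem.Dict Int (List Int)),
    (l.foldl (compsPureStep c) d).keys = PySem.Set.update d.keys (l.map c) := by
  intro l
  induction l with
  | nil => intro d; simp [PySem.Set.update_nil]
  | cons i l ih =>
    intro d
    simp only [List.foldl_cons, List.map_cons, PySem.Set.update_cons]
    rw [ih]
    congr 1
    unfold compsPureStep
    by_cases hc : d.contains (c i) = true
    · rw [if_pos hc, PySem.Dict.keys_modify, PySem.Dict.keys_insert_of_contains d _ hc,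
          PySem.Set.add_of_mem ((PySem.Dict.contains_iff_mem_keys d (c i)).1 hc)]
    · have hc' : d.contains (c i) = false := by simpa using hc
      rw [if_neg (by simp [hc']), PySem.Dict.keys_modify,
          PySem.Dict.keys_insert_of_contains _ _ (PySem.Dict.contains_insert_self d (c i) []),
          PySem.Dict.keys_insert_of_not_contains d _ hc',
          PySem.Set.add_of_not_mem (fun hmem => by
            rw [(PySem.Dict.contains_iff_mem_keys d (c i)).2 hmem] at hc'
            simp at hc')]

-- named unfoldings of the two ports (definitional)
def ASt2 (n : Int) (edges : List (Int × Int)) : List Int × PySem.Dict Int (List Int) :=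
  (PySem.List.pyRange 1 (n+1) 1).foldl (compsStepA (edges.length+1))
    (edges.foldl (unionA (edges.length+1)) (PySem.List.pyRange 0 (n+1) 1), PySem.Dict.empty)

def ASt3 (n k : Int) (edges : List (Int × Int)) :
    List Int × PySem.Dict Int Int × List Int :=
  (PySem.List.pyRange 1 (n+1) 1).foldl (resStepA (edges.length+1) k)
    ((ASt2 n edges).1, idxInitA (ASt2 n edges).2, List.replicate (n+1).toNat (-1))

def BComp (n : Int) (edges : List (Int × Int)) : List Int :=
  edges.foldl relabelB (PySem.List.pyRange 0 (n+1) 1)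

def BSt (n k : Int) (edges : List (Int × Int)) : List String × PySem.Dict Int Int :=
  (PySem.List.pyRange 1 (n+1) 1).foldl (labelStepB (BComp n edges) k) ([], PySem.Dict.empty)

theorem solve_eq (n m k : Int) (edges : List (Int × Int)) :
    solve n m k edges =
      if (ASt2 n edges).2.keys.any (fun ru => (ASt3 n k edges).2.1.getD ru 0 < k)
      then "impossible"
      else PySem.Str.join " "
        ((PySem.List.slice (ASt3 n k edges).2.2 (some 1) none).map PySem.Int.toStr) := rfl

theorem solve_alt_eq (n m k : Int) (edges : List (Int × Int)) :
    solve_alt n m k edges =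
      if (BSt n k edges).2.values.any (fun t => t < k) then "impossible"
      else PySem.Str.join " " (BSt n k edges).1 := rfl

theorem inv_init (N : Int) (hN : 0 ≤ N) :
    InvAB N 0 (PySem.List.pyRange 0 (N+1) 1) (PySem.List.pyRange 0 (N+1) 1) := by
  have hlen : (PySem.List.pyRange 0 (N+1) 1).length = (N+1).toNat := by
    rw [PySem.List.length_pyRange_one]
    omega
  have hCC : ∀ i, InRng N i → CC (PySem.List.pyRange 0 (N+1) 1) i = i := by
    intro i hi
    obtain ⟨hi0, hiN⟩ := hi
    unfold CC
    rw [PySem.List.pyGetD_eq_getElem _ _ hi0 (by omega)]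
    rw [PySem.List.getElem_pyRange_one]
    omega
  refine ⟨⟨hlen, fun i hi => ?_⟩, hlen, fun i hi => ?_⟩
  · show InRng N (CC (PySem.List.pyRange 0 (N+1) 1) i)
    rw [hCC i hi]; exact hi
  · refine ⟨by rw [hCC i hi]; exact hi, by rw [hCC i hi, hCC i hi], ?_⟩
    refine ⟨0, le_refl 0, by rw [hCC i hi]; rfl, ?_⟩
    show PPar _ (CC _ i) = CC _ i
    rw [hCC i hi]
    exact hCC i hi

-- ===== phase 5: Python's negative-index wraparound (roots[u] for -(n+1) ≤ u < 0) =====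

theorem pyGetD_wrap (xs : List Int) (N u : Int) (d : Int) (hlen : xs.length = (N+1).toNat)
    (hN : 0 ≤ N) (h1 : -(N+1) ≤ u) (h2 : u < 0) :
    PySem.List.pyGetD xs u d = PySem.List.pyGetD xs (u + (N+1)) d := by
  unfold PySem.List.pyGetD PySem.List.pyGet? PySem.List.pyIdx?
  rw [if_neg (by omega), if_pos (by omega), if_pos (by omega), if_pos (by omega)]
  have h : xs.length - (-u).toNat = (u + (N+1)).toNat := by omega
  rw [h]

theorem pySetD_wrap (xs : List Int) (N u : Int) (v : Int) (hlen : xs.length = (N+1).toNat)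
    (hN : 0 ≤ N) (h1 : -(N+1) ≤ u) (h2 : u < 0) :
    PySem.List.pySetD xs u v = PySem.List.pySetD xs (u + (N+1)) v := by
  unfold PySem.List.pySetD PySem.List.pySet? PySem.List.pyIdx?
  rw [if_neg (by omega), if_pos (by omega), if_pos (by omega), if_pos (by omega)]
  have h : xs.length - (-u).toNat = (u + (N+1)).toNat := by omega
  rw [h]

theorem pySetD_self_root (N : Int) (roots : List Int) (u : Int) (hlen : roots.length = (N+1).toNat)
    (hN : 0 ≤ N) (h1 : -(N+1) ≤ u) (h2 : u < 0)
    (hroot : PySem.List.pyGetD roots (u + (N+1)) 0 = u + (N+1)) :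
    PySem.List.pySetD roots u (u + (N+1)) = roots := by
  rw [pySetD_wrap roots N u (u + (N+1)) hlen hN h1 h2,
      PySem.List.pySetD_of_nonneg roots (u + (N+1)) (show (0:Int) ≤ u + (N+1) by omega)]
  have hlt : (u + (N+1)).toNat < roots.length := by omega
  have hval : roots[(u + (N+1)).toNat] = u + (N+1) := by
    rw [PySem.List.pyGetD_eq_getElem roots 0 (by omega) (by omega)] at hroot
    exact hroot
  calc roots.set (u + (N+1)).toNat (u + (N+1))
      = roots.set (u + (N+1)).toNat (roots[(u + (N+1)).toNat]) := by rw [hval]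
    _ = roots := List.set_getElem_self hlt

def InRngE (N u : Int) : Prop := -(N+1) ≤ u ∧ u ≤ N

def normE (N : Int) (e : Int × Int) : Int × Int :=
  (if e.1 < 0 then e.1 + (N+1) else e.1, if e.2 < 0 then e.2 + (N+1) else e.2)

theorem rootA_succ (f : Nat) (roots : List Int) (node : Int) :
    rootA (f+1) roots node =
      if PySem.List.pyGetD roots node 0 ≠ node then
        (PySem.List.pySetD (rootA f roots (PySem.List.pyGetD roots node 0)).1 node
          (rootA f roots (PySem.List.pyGetD roots node 0)).2,
         (rootA f roots (PySem.List.pyGetD roots node 0)).2)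
      else (roots, node) := rfl

set_option maxRecDepth 4096 in
theorem rootA_neg (N : Int) (fuel b : Nat) (roots : List Int) (u r : Int)
    (hok : RootsOk N roots) (hN : 0 ≤ N) (h1 : -(N+1) ≤ u) (h2 : u < 0)
    (hre : Reach roots b (u + (N+1)) r) (hb : b + 1 < fuel) :
    rootA fuel roots u = rootA fuel roots (u + (N+1)) := by
  obtain ⟨f, rfl⟩ : ∃ f, fuel = f + 1 := ⟨fuel - 1, by omega⟩
  have hu' : InRng N (u + (N+1)) := ⟨by omega, by omega⟩
  have hp : PySem.List.pyGetD roots u 0 = PySem.List.pyGetD roots (u + (N+1)) 0 :=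
    pyGetD_wrap roots N u 0 hok.1 hN h1 h2
  obtain ⟨hp0, hpN⟩ := hok.2 _ hu'
  have hpu : ¬ ¬ (PySem.List.pyGetD roots u 0 ≠ u) := by
    unfold PPar at hp0
    rw [hp]
    omega
  by_cases hroot : PySem.List.pyGetD roots (u + (N+1)) 0 = u + (N+1)
  · -- u+(N+1) is already a root: the wrapped access ends in a no-op write
    obtain ⟨f', rfl⟩ : ∃ f', f = f' + 1 := ⟨f - 1, by omega⟩
    have hRrec : rootA (f' + 1) roots (u + (N+1)) = (roots, u + (N+1)) := by
      rw [rootA_succ, if_neg (by simpa using hroot)]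
    rw [rootA_succ, if_pos (by simpa using hpu), hp, hroot, hRrec]
    rw [show rootA (f' + 1 + 1) roots (u + (N+1)) = (roots, u + (N+1)) from by
      rw [rootA_succ, if_neg (by simpa using hroot)]]
    have hset : PySem.List.pySetD roots u (u + (N+1)) = roots :=
      pySetD_self_root N roots u hok.1 hN h1 h2 hroot
    show (PySem.List.pySetD roots u (u + (N+1)), u + (N+1)) = (roots, u + (N+1))
    rw [hset]
  · -- both sides recurse on the same parent and write the same root value
    obtain ⟨d, hd, hit, hroot_r⟩ := hre
    have hd1 : 1 ≤ d := by
      rcases Nat.eq_zero_or_pos d with h0 | h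
      · exfalso
        apply hroot
        have : u + (N+1) = r := by simpa [h0, iterP] using hit
        rw [this]
        exact hroot_r
      · exact h
    have hrep : Reach roots (b-1) (PPar roots (u + (N+1))) r := by
      refine ⟨d - 1, by omega, ?_, hroot_r⟩
      have h' : iterP roots (1 + (d-1)) (u + (N+1)) = r := by
        rw [show 1 + (d-1) = d by omega]; exact hit
      rw [iterP_add] at h'
      simpa [iterP] using h'
    obtain ⟨roots1, heq1, hok1, -⟩ :=
      rootA_spec N f roots (b-1) (PPar roots (u + (N+1))) r hok ⟨hp0, hpN⟩ hrep (by omega)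
    unfold PPar at heq1
    rw [rootA_succ, if_pos (by simpa using hpu), hp,
        rootA_succ, if_pos (by simpa using hroot), heq1]
    rw [pySetD_wrap roots1 N u _ hok1.1 hN h1 h2]

theorem step_norm (N : Int) (fuel b : Nat) (roots comp : List Int) (e : Int × Int)
    (hinv : InvAB N b roots comp) (hN : 0 ≤ N)
    (h1 : InRngE N e.1) (h2 : InRngE N e.2) (hb : b + 1 < fuel) :
    unionA fuel roots e = unionA fuel roots (normE N e) ∧
    relabelB comp e = relabelB comp (normE N e) ∧
    InRng N (normE N e).1 ∧ InRng N (normE N e).2 := by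
  have hok := hinv.1
  have hlen := hinv.2.1
  have hmain := hinv.2.2
  obtain ⟨h1a, h1b⟩ := h1
  obtain ⟨h2a, h2b⟩ := h2
  have hn1 : InRng N (normE N e).1 := by
    unfold normE InRng; dsimp only; split <;> constructor <;> omega
  have hn2 : InRng N (normE N e).2 := by
    unfold normE InRng; dsimp only; split <;> constructor <;> omega
  have hg1 : PySem.List.pyGetD comp e.1 0 = PySem.List.pyGetD comp (normE N e).1 0 := by
    unfold normE; dsimp only; split
    · exact pyGetD_wrap comp N e.1 0 hlen hN h1a (by assumption)
    · rfl
  have hg2 : PySem.List.pyGetD comp e.2 0 = PySem.List.pyGetD comp (normE N e).2 0 := by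
    unfold normE; dsimp only; split
    · exact pyGetD_wrap comp N e.2 0 hlen hN h2a (by assumption)
    · rfl
  have hr1 : rootA fuel roots e.1 = rootA fuel roots (normE N e).1 := by
    unfold normE; dsimp only; split
    · rename_i hc
      obtain ⟨-, -, hre⟩ := hmain (e.1 + (N+1)) ⟨by omega, by omega⟩
      exact rootA_neg N fuel b roots e.1 _ hok hN h1a hc hre hb
    · rfl
  obtain ⟨roots1, heq, hinv1⟩ := rootA_inv N fuel b roots comp (normE N e).1 hinv hn1 (by omega)
  have hr2 : rootA fuel roots1 e.2 = rootA fuel roots1 (normE N e).2 := by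
    unfold normE; dsimp only; split
    · rename_i hc
      obtain ⟨-, -, hre⟩ := hinv1.2.2 (e.2 + (N+1)) ⟨by omega, by omega⟩
      exact rootA_neg N fuel b roots1 e.2 _ hinv1.1 hN h2a hc hre hb
    · rfl
  refine ⟨?_, ?_, hn1, hn2⟩
  · unfold unionA
    rw [hr1, heq]
    simp only
    rw [hr2]
  · unfold relabelB
    rw [hg1, hg2]

theorem fold_edges (N : Int) (hN : 0 ≤ N) (fuel : Nat) : ∀ (es : List (Int × Int)) (b : Nat) (roots comp : List Int),
    InvAB N b roots comp → (∀ e ∈ es, InRngE N e.1 ∧ InRngE N e.2) → b + es.length < fuel →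
    InvAB N (b + es.length) (es.foldl (unionA fuel) roots) (es.foldl relabelB comp) := by
  intro es
  induction es with
  | nil => intro b roots comp hinv _ _; simpa using hinv
  | cons e es ih =>
    intro b roots comp hinv hes hb
    obtain ⟨he1, he2⟩ := hes e (by simp)
    obtain ⟨hu, hr, hn1, hn2⟩ :=
      step_norm N fuel b roots comp e hinv hN he1 he2 (by simp at hb; omega)
    rw [List.foldl_cons, List.foldl_cons, hu, hr]
    have hstep := union_preserves N fuel b roots comp (normE N e) hinv hn1 hn2 (by simp at hb; omega)
    have := ih (b+1) _ _ hstep (fun x hx => hes x (by simp [hx])) (by simp at hb ⊢; omega)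
    simpa [show b + 1 + es.length = b + (es.length + 1) by omega] using this

-- ===== VERDICT =====
theorem solve_spec : Claim_equal_solve := by
  unfold Claim_equal_solve
  intro n m k edges _ hpre
  rcases hpre with ⟨hn, -, hedge⟩ | ⟨hn, rfl⟩
  case inr =>
    -- n < 0 and no edges: both programs run over empty ranges and return ""
    unfold Spec_solve
    rw [solve_eq, solve_alt_eq]
    have hr1 : PySem.List.pyRange 1 (n+1) 1 = [] := PySem.List.pyRange_one_eq_nil (by omega)
    have h0 : (n+1).toNat = 0 := by omega
    simp [ASt2, ASt3, BComp, BSt, hr1, h0, idxInitA]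
    rw [PySem.List.slice_from [] (show (0:Int) ≤ 1 by omega)]
    simp [show (PySem.Dict.empty : PySem.Dict Int Int).values = [] from rfl]
  unfold Spec_solve
  rw [solve_eq, solve_alt_eq]
  have hfuel : edges.length < edges.length + 1 := by omega
  have hedges' : ∀ e ∈ edges, InRngE n e.1 ∧ InRngE n e.2 := by
    intro e he
    obtain ⟨h1, h2, h3, h4⟩ := hedge e he
    exact ⟨⟨h1, h2⟩, ⟨h3, h4⟩⟩
  have hinvF : InvAB n edges.length
      (edges.foldl (unionA (edges.length+1)) (PySem.List.pyRange 0 (n+1) 1)) (BComp n edges) := by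
    have := fold_edges n hn (edges.length+1) edges 0 _ _ (inv_init n hn) hedges' (by omega)
    simpa [BComp] using this
  have hlmem : ∀ i ∈ PySem.List.pyRange 1 (n+1) 1, InRng n i := by
    intro i hi
    rw [PySem.List.mem_pyRange_one] at hi
    exact ⟨by omega, by omega⟩
  obtain ⟨hc2, hinv2⟩ := comps_fold n (edges.length+1) edges.length (BComp n edges)
      (PySem.List.pyRange 1 (n+1) 1)
      (edges.foldl (unionA (edges.length+1)) (PySem.List.pyRange 0 (n+1) 1))
      PySem.Dict.empty hinvF hlmem hfuel
  have hc2' : (ASt2 n edges).2 = (PySem.List.pyRange 1 (n+1) 1).foldl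
      (compsPureStep (fun i => CC (BComp n edges) i)) PySem.Dict.empty := hc2
  have hres : (ASt3 n k edges).2 = (PySem.List.pyRange 1 (n+1) 1).foldl
      (resPureStep (fun i => CC (BComp n edges) i) k)
      (idxInitA (ASt2 n edges).2, List.replicate (n+1).toNat (-1)) :=
    res_fold n (edges.length+1) edges.length k (BComp n edges)
      (PySem.List.pyRange 1 (n+1) 1) (ASt2 n edges).1 (idxInitA (ASt2 n edges).2)
      (List.replicate (n+1).toNat (-1)) hinv2 hlmem hfuel
  rw [hc2'] at hres
  rw [hc2']
  -- abbreviations for the pure data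
  set c : Int → Int := fun i => CC (BComp n edges) i with hc
  set l : List Int := PySem.List.pyRange 1 (n+1) 1 with hldef
  set compsP : PySem.Dict Int (List Int) := l.foldl (compsPureStep c) PySem.Dict.empty with hcompsP
  have hpoint : ∀ x, (idxInitA compsP).getD x 0 = PySem.Dict.empty.getD x 0 := by
    intro x
    rw [PySem.Dict.getD_empty]
    exact idxInit_getD compsP.keys PySem.Dict.empty (fun x => PySem.Dict.getD_empty x 0) x
  set vals : List Int := valsP c k l PySem.Dict.empty with hvals
  have hpure : l.foldl (resPureStep c k) (idxInitA compsP, List.replicate (n+1).toNat (-1)) =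
      (dFold c l (idxInitA compsP),
       (l.zip vals).foldl (fun r (p : Int × Int) => PySem.List.pySetD r p.1 p.2)
         (List.replicate (n+1).toNat (-1))) :=
    resPure_fold c k l (idxInitA compsP) PySem.Dict.empty (List.replicate (n+1).toNat (-1)) hpoint
  have hwrite : (l.zip vals).foldl (fun r (p : Int × Int) => PySem.List.pySetD r p.1 p.2)
      (List.replicate (n+1).toNat (-1)) =
      (List.replicate (n+1).toNat (-1)).take (1 : Int).toNat ++ vals := by
    refine write_run n vals 1 (List.replicate (n+1).toNat (-1)) (by omega) ?_ (by simp)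
    rw [hvals, length_valsP, hldef, PySem.List.length_pyRange_one]
  have hB : BSt n k edges = ([] ++ (valsP c k l PySem.Dict.empty).map PySem.Int.toStr,
      dFold c l PySem.Dict.empty) := labelB_fold (BComp n edges) k l [] PySem.Dict.empty
  rw [hres, hpure, hwrite, hB]
  -- the two membership tests agree
  have hkeysA : compsP.keys = PySem.Set.ofList (l.map c) := by
    rw [hcompsP, comps_keys c l PySem.Dict.empty]
    rw [show (PySem.Dict.empty : PySem.Dict Int (List Int)).keys = [] from rfl,
        PySem.Set.update_nil_left]
  have hkeysB : (dFold c l PySem.Dict.empty).keys = PySem.Set.ofList (l.map c) := by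
    unfold dFold
    rw [PySem.Dict.keys_foldl_insert_key l c (fun d x => d.getD (c x) 0 + 1) PySem.Dict.empty]
    rw [show (PySem.Dict.empty : PySem.Dict Int Int).keys = [] from rfl, PySem.Set.update_nil_left]
  have hnodupB : (dFold c l PySem.Dict.empty).keys.Nodup := by
    unfold dFold
    exact PySem.Dict.nodup_keys_foldl_insert_key l c (fun d x => d.getD (c x) 0 + 1)
      PySem.Dict.empty PySem.Dict.nodup_keys_empty
  have hpoint2 : ∀ x, (dFold c l (idxInitA compsP)).getD x 0 = (dFold c l PySem.Dict.empty).getD x 0 :=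
    dFold_congr c l _ _ hpoint
  have hcond : compsP.keys.any (fun ru => (dFold c l (idxInitA compsP)).getD ru 0 < k) =
      (dFold c l PySem.Dict.empty).values.any (fun t => t < k) := by
    rw [PySem.Dict.values_eq_map_keys _ hnodupB 0, List.any_map, hkeysB, hkeysA]
    refine PySem.List.any_congr_mem (fun x _ => ?_)
    simp only [Function.comp]
    rw [hpoint2 x]
  rw [hcond]
  -- the two label lists agree
  have hslice : PySem.List.slice
      ((List.replicate (n+1).toNat (-1 : Int)).take (1 : Int).toNat ++ vals) (some 1) none = vals := by
    rw [PySem.List.slice_from _ (by omega : (0:Int) ≤ 1)]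
    have h1 : ((1 : Int)).toNat = 1 := rfl
    rw [h1, List.take_replicate]
    have hmin : min 1 (n+1).toNat = 1 := by omega
    rw [hmin]
    rw [show (List.replicate 1 (-1 : Int)) = [-1] from rfl]
    rw [show ([-1] : List Int) ++ vals = [(-1 : Int)] ++ vals from rfl]
    rw [show (1 : Nat) = [(-1 : Int)].length from rfl, List.drop_left]
  rw [hslice]
  simp [hvals]
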